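-- pv_equiv track=rewrite | github.com/Buiilding/chess-automation | src3/generation.py | place_piece_notation
-- ===== SOURCE A (Python) =====
-- def place_piece_notation(square_coords, piece_coords):
--     Piece_notation = {}
--     for notation, n_coord in square_coords.items():
--         for piece, p_coord in piece_coords.items():
--             for coord in p_coord:
--                 if abs(n_coord[0] - coord[0]) < 15 and abs(n_coord[1] - coord[1]) < 15:
--                     if piece == 'w_pawn':
--                         Piece_notation[notation] = 'P'
--                     elif piece == 'w_king':
--                         Piece_notation[notation] = 'K'
--                     elif piece == 'w_queen':
--                         Piece_notation[notation] = 'Q'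
--                     elif piece == 'b_pawn':
--                         Piece_notation[notation] = 'p'
--                     elif piece == 'b_king':
--                         Piece_notation[notation] = 'k'
--                     elif piece == 'b_queen':
--                         Piece_notation[notation] = 'q'
--                     elif piece == 'w_rook':
--                         Piece_notation[notation] = 'R'
--                     elif piece == 'b_rook':
--                         Piece_notation[notation] = 'r'
--                     elif piece == 'w_knight':
--                         Piece_notation[notation] = 'N'
--                     elif piece == 'b_knight':
--                        Piece_notation[notation] = 'n'
--                     elif piece == 'w_bishop':
--                         Piece_notation[notation] = 'B'
--                     elif piece == 'b_bishop':
--                         Piece_notation[notation] = 'b'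
--                     break
--         if notation not in Piece_notation:
--             Piece_notation[notation] = 'nan'
--     return Piece_notation
-- ===== SOURCE B (Python) =====
-- # B: spatial bucket hash on x//15 built once over the squares; then iterate pieces in
-- # order, each piece coordinate stamping its letter onto the matching squares found in
-- # the three neighbouring buckets (later pieces overwrite earlier ones, as in A).
-- _LETTER = {'w_pawn': 'P', 'w_king': 'K', 'w_queen': 'Q', 'b_pawn': 'p',
--            'b_king': 'k', 'b_queen': 'q', 'w_rook': 'R', 'b_rook': 'r',
--            'w_knight': 'N', 'b_knight': 'n', 'w_bishop': 'B', 'b_bishop': 'b'}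
--
--
-- def place_piece_notation(square_coords, piece_coords):
--     result = {notation: 'nan' for notation in square_coords}
--     buckets = {}
--     for notation, n in square_coords.items():
--         buckets.setdefault(n[0] // 15, []).append((notation, n))
--     for piece, coords in piece_coords.items():
--         letter = _LETTER.get(piece)
--         if letter is None:
--             continue
--         for c in coords:
--             cx = c[0] // 15
--             for gx in (cx - 1, cx, cx + 1):
--                 for notation, n in buckets.get(gx, ()):
--                     if abs(n[0] - c[0]) < 15 and abs(n[1] - c[1]) < 15:
--                         result[notation] = letter
--     return result
-- ===== Notes on version B (the rewrite author's own statement) =====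
-- stated objective: faster
-- what changed: B replaces A's per-square scan of every piece coordinate (with an elif chain and dict-membership bookkeeping) by a spatial bucket hash: square centers are bucketed once by x//15, then pieces are iterated in order and each piece coordinate stamps its letter (from a lookup table) onto the matching squares found in the three neighbouring buckets, later pieces overwriting earlier ones.
-- outside the precondition, e.g. on place_piece_notation({'a': []}, {}): A returns {'a': 'nan'}, B raises IndexError; on place_piece_notation({}, {'w_pawn': [[]]}): A returns {}, B raises IndexError
import Mathlib
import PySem

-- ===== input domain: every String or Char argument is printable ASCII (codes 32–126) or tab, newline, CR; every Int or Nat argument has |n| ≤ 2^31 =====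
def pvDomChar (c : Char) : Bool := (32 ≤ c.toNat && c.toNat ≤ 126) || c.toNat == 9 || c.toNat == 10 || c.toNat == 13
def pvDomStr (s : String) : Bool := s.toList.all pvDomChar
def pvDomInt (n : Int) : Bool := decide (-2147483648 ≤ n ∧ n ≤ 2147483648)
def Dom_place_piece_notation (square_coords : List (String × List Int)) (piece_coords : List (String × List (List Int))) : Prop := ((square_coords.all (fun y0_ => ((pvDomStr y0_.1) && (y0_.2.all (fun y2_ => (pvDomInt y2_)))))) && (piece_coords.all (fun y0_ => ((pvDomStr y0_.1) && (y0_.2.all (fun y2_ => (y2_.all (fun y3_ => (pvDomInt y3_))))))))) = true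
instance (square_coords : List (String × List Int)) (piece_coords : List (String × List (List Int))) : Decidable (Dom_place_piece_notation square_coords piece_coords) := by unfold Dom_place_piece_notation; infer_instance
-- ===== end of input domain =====

-- B drops A's per-square scan of all pieces for a spatial bucket hash on x//15:
-- pieces are iterated in order, each coordinate stamping its letter onto the matching
-- squares of the three neighbouring buckets, later pieces overwriting earlier ones.

-- ===== PORT A =====
-- the `for coord in p_coord: if <near>: …; break` loop: stops at the first near coord.
-- pyGetD with default 0: Pre_ guarantees the indexed lists are long enough exactly
-- where Python's [0]/[1] would otherwise raise IndexError (excluded inputs).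
def pA_firstHit (n_coord : List Int) (p_coord : List (List Int)) : Bool :=
  match p_coord with
  | [] => false
  | coord :: rest =>
    if (PySem.List.pyGetD n_coord 0 0 - PySem.List.pyGetD coord 0 0).natAbs < 15
        && (PySem.List.pyGetD n_coord 1 0 - PySem.List.pyGetD coord 1 0).natAbs < 15
    then true
    else pA_firstHit n_coord rest

-- A's elif chain `Piece_notation[notation] = …`
def pA_assign (d : PySem.Dict String String) (nota piece : String) : PySem.Dict String String :=
  if piece = "w_pawn" then d.insert nota "P"
  else if piece = "w_king" then d.insert nota "K"
  else if piece = "w_queen" then d.insert nota "Q"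
  else if piece = "b_pawn" then d.insert nota "p"
  else if piece = "b_king" then d.insert nota "k"
  else if piece = "b_queen" then d.insert nota "q"
  else if piece = "w_rook" then d.insert nota "R"
  else if piece = "b_rook" then d.insert nota "r"
  else if piece = "w_knight" then d.insert nota "N"
  else if piece = "b_knight" then d.insert nota "n"
  else if piece = "w_bishop" then d.insert nota "B"
  else if piece = "b_bishop" then d.insert nota "b"
  else d

def place_piece_notation (square_coords : List (String × List Int)) (piece_coords : List (String × List (List Int))) : List (String × String) :=
  (square_coords.foldl (fun (d : PySem.Dict String String) nc =>
      let d := piece_coords.foldl (fun d pp =>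
          if pA_firstHit nc.2 pp.2 then pA_assign d nc.1 pp.1 else d) d
      if d.contains nc.1 then d else d.insert nc.1 "nan")
    PySem.Dict.empty).items

-- ===== PORT B =====
def pB_letter : PySem.Dict String String :=
  PySem.Dict.ofList [("w_pawn","P"),("w_king","K"),("w_queen","Q"),("b_pawn","p"),
    ("b_king","k"),("b_queen","q"),("w_rook","R"),("b_rook","r"),
    ("w_knight","N"),("b_knight","n"),("w_bishop","B"),("b_bishop","b")]

-- abs(n[0]-c[0])<15 and abs(n[1]-c[1])<15 (pyGetD default 0: Pre_ excludes the inputs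
-- where Python's indexing here would raise IndexError)
def pB_near (n c : List Int) : Bool :=
  (PySem.List.pyGetD n 0 0 - PySem.List.pyGetD c 0 0).natAbs < 15 &&
  (PySem.List.pyGetD n 1 0 - PySem.List.pyGetD c 1 0).natAbs < 15

-- x[0] // 15, the bucket key
def pB_bx (l : List Int) : Int := PySem.Int.floordiv (PySem.List.pyGetD l 0 0) 15

-- `buckets.setdefault(n[0] // 15, []).append((notation, n))`
def pB_buckets (square_coords : List (String × List Int)) : PySem.Dict Int (List (String × List Int)) :=
  square_coords.foldl (fun g nc => g.modify (pB_bx nc.2) [] (· ++ [nc])) PySem.Dict.empty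

-- `for gx in (cx-1, cx, cx+1): for notation, n in buckets.get(gx, ()): if <near>: result[notation] = letter`
def pB_stampCoord (letter : String) (c : List Int)
    (g : PySem.Dict Int (List (String × List Int)))
    (r : PySem.Dict String String) : PySem.Dict String String :=
  let cx := pB_bx c
  [cx - 1, cx, cx + 1].foldl (fun r gx =>
    (g.getD gx []).foldl (fun r nc =>
      if pB_near nc.2 c then r.insert nc.1 letter else r) r) r

def place_piece_notation_alt (square_coords : List (String × List Int)) (piece_coords : List (String × List (List Int))) : List (String × String) :=
  (piece_coords.foldl (fun r pp =>
      match pB_letter.get? pp.1 with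
      | none => r
      | some letter => pp.2.foldl (fun r c => pB_stampCoord letter c (pB_buckets square_coords) r) r)
    (square_coords.foldl (fun (r : PySem.Dict String String) nc => r.insert nc.1 "nan") PySem.Dict.empty)).items

-- ===== PRECONDITION & SPEC =====
-- Pre_ excludes (a) inputs where one of the two Pythons would index a coordinate list
-- out of range and raise IndexError — every square coordinate needs a first component,
-- every coordinate of a piece that is visited (squares present, or the piece name
-- known to B) needs one too, and both need a second component whenever the first
-- components are within 15; on a few such short-coordinate inputs A still returns
-- (because its break or an always-failing x-test skips the short coordinate) while
-- B's bucketing indexes it anyway — see cites; and (b) association lists with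
-- duplicate keys, which cannot arise from a Python dict argument.
def Pre_place_piece_notation (square_coords : List (String × List Int)) (piece_coords : List (String × List (List Int))) : Prop :=
  (square_coords.map Prod.fst).Nodup ∧ (piece_coords.map Prod.fst).Nodup ∧
  (∀ p ∈ square_coords, 1 ≤ p.2.length) ∧
  (∀ q ∈ piece_coords, (square_coords ≠ [] ∨ q.1 ∈ ["w_pawn","w_king","w_queen","b_pawn","b_king","b_queen","w_rook","b_rook","w_knight","b_knight","w_bishop","b_bishop"]) → ∀ c ∈ q.2, 1 ≤ c.length) ∧
  (∀ p ∈ square_coords, ∀ q ∈ piece_coords, ∀ c ∈ q.2,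
    (PySem.List.pyGetD p.2 0 0 - PySem.List.pyGetD c 0 0).natAbs < 15 →
      2 ≤ p.2.length ∧ 2 ≤ c.length)
instance (square_coords : List (String × List Int)) (piece_coords : List (String × List (List Int))) : Decidable (Pre_place_piece_notation square_coords piece_coords) := by unfold Pre_place_piece_notation; infer_instance

def pvWitness_place_piece_notation : (List (String × List Int)) × (List (String × List (List Int))) :=
  ([("a1", [2, 3]), ("b1", [40, 3])], [("w_pawn", [[100, 100], [1, 1]]), ("junk", [[40, 2]]), ("b_rook", [[41, 4]])])

def Spec_place_piece_notation (square_coords : List (String × List Int)) (piece_coords : List (String × List (List Int))) (out : List (String × String)) : Prop := out = place_piece_notation_alt square_coords piece_coords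
instance (square_coords : List (String × List Int)) (piece_coords : List (String × List (List Int))) (out : List (String × String)) : Decidable (Spec_place_piece_notation square_coords piece_coords out) := by unfold Spec_place_piece_notation; infer_instance

-- ===== CLAIM (what is proved, stated in full; the proofs are below) =====
def Claim_equal_place_piece_notation : Prop := ∀ (square_coords : List (String × List Int)) (piece_coords : List (String × List (List Int))), Dom_place_piece_notation square_coords piece_coords → Pre_place_piece_notation square_coords piece_coords → Spec_place_piece_notation square_coords piece_coords (place_piece_notation square_coords piece_coords)

-- ===== LEMMAS AND PROOFS =====

-- A's elif chain is exactly a lookup in B's letter table.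
theorem assign_eq_lookup (d : PySem.Dict String String) (nota piece : String) :
    pA_assign d nota piece =
      match pB_letter.get? piece with
      | some L => d.insert nota L
      | none => d := by
  unfold pA_assign
  rw [show pB_letter = PySem.Dict.mk [("w_pawn","P"),("w_king","K"),("w_queen","Q"),("b_pawn","p"),
      ("b_king","k"),("b_queen","q"),("w_rook","R"),("b_rook","r"),
      ("w_knight","N"),("b_knight","n"),("w_bishop","B"),("b_bishop","b")] from rfl]
  simp only [PySem.Dict.get?_mk_cons, beq_iff_eq]
  by_cases h1 : "w_pawn" = piece
  · subst h1; simp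
  by_cases h2 : "w_king" = piece
  · subst h2; simp
  by_cases h3 : "w_queen" = piece
  · subst h3; simp
  by_cases h4 : "b_pawn" = piece
  · subst h4; simp
  by_cases h5 : "b_king" = piece
  · subst h5; simp
  by_cases h6 : "b_queen" = piece
  · subst h6; simp
  by_cases h7 : "w_rook" = piece
  · subst h7; simp
  by_cases h8 : "b_rook" = piece
  · subst h8; simp
  by_cases h9 : "w_knight" = piece
  · subst h9; simp
  by_cases h10 : "b_knight" = piece
  · subst h10; simp
  by_cases h11 : "w_bishop" = piece
  · subst h11; simp
  by_cases h12 : "b_bishop" = piece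
  · subst h12; simp
  simp [h1, h2, h3, h4, h5, h6, h7, h8, h9, h10, h11, h12,
    Ne.symm h1, Ne.symm h2, Ne.symm h3, Ne.symm h4, Ne.symm h5, Ne.symm h6,
    Ne.symm h7, Ne.symm h8, Ne.symm h9, Ne.symm h10, Ne.symm h11, Ne.symm h12,
    PySem.Dict.get?]

-- A's break-at-first-near-coordinate scan is a short-circuited any.
theorem firstHit_eq_any (n : List Int) (cs : List (List Int)) :
    pA_firstHit n cs = cs.any (pB_near n) := by
  induction cs with
  | nil => rfl
  | cons c rest ih =>
      simp only [pA_firstHit, pB_near, List.any_cons, ← ih]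
      split_ifs with h <;> simp [h]

-- the letters of the pieces (in order) that are near n and have a known name
def hitLetters (n : List Int) (pc : List (String × List (List Int))) : List String :=
  pc.filterMap (fun pp => if pA_firstHit n pp.2 then pB_letter.get? pp.1 else none)

-- A's inner piece loop for one square: the last near known piece wins.
theorem innerA (n : List Int) (nota : String) (pc : List (String × List (List Int)))
    (d : PySem.Dict String String) :
    pc.foldl (fun d pp => if pA_firstHit n pp.2 then pA_assign d nota pp.1 else d) d
      = match (hitLetters n pc).getLast? with
        | some L => d.insert nota L
        | none => d := by
  induction pc using List.reverseRecOn with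
  | nil => rfl
  | append_singleton l pp ih =>
      simp only [List.foldl_append, List.foldl_cons, List.foldl_nil]
      rw [ih]
      unfold hitLetters
      rw [List.filterMap_append]
      by_cases hhit : pA_firstHit n pp.2
      · rw [if_pos hhit, assign_eq_lookup]
        rcases hget : pB_letter.get? pp.1 with _ | L
        · rw [show List.filterMap (fun pp => if pA_firstHit n pp.2 = true then pB_letter.get? pp.1 else none) [pp] = [] from by simp [hhit, hget],
            List.append_nil]
        · rw [show List.filterMap (fun pp => if pA_firstHit n pp.2 = true then pB_letter.get? pp.1 else none) [pp] = [L] from by simp [hhit, hget],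
            List.getLast?_concat]
          rcases hprev : (List.filterMap (fun pp => if pA_firstHit n pp.2 = true then pB_letter.get? pp.1 else none) l).getLast? with _ | L'
          · rw [hprev]
          · rw [hprev]; exact PySem.Dict.insert_insert_self d nota L' L
      · rw [if_neg hhit,
          show List.filterMap (fun pp => if pA_firstHit n pp.2 = true then pB_letter.get? pp.1 else none) [pp] = [] from by simp [hhit],
          List.append_nil]

-- A's outer square loop appends one (notation, letter) entry per square
theorem outerA (pc : List (String × List (List Int))) (sq : List (String × List Int))
    (d : PySem.Dict String String)
    (hfresh : ∀ a ∈ sq, d.contains a.1 = false)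
    (hnd : (sq.map Prod.fst).Nodup) :
    (sq.foldl (fun (d : PySem.Dict String String) nc =>
        let d := pc.foldl (fun d pp =>
            if pA_firstHit nc.2 pp.2 then pA_assign d nc.1 pp.1 else d) d
        if d.contains nc.1 then d else d.insert nc.1 "nan") d).items
      = d.items ++ sq.map (fun nc => (nc.1, ((hitLetters nc.2 pc).getLast?).getD "nan")) := by
  induction sq generalizing d with
  | nil => simp
  | cons nc rest ih =>
      have hfnc : d.contains nc.1 = false := hfresh nc (List.mem_cons_self)
      have hstep : (let d' := pc.foldl (fun d pp =>
            if pA_firstHit nc.2 pp.2 then pA_assign d nc.1 pp.1 else d) d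
          if d'.contains nc.1 then d' else d'.insert nc.1 "nan")
          = d.insert nc.1 (((hitLetters nc.2 pc).getLast?).getD "nan") := by
        rw [innerA]
        cases h : (hitLetters nc.2 pc).getLast? with
        | some L => simp [PySem.Dict.contains_insert_self]
        | none => simp [hfnc]
      simp only [List.foldl_cons]
      rw [hstep, ih]
      · rw [PySem.Dict.items_insert_of_not_contains _ _ hfnc]
        simp
      · intro a ha
        rw [PySem.Dict.contains_insert]
        have : a.1 ≠ nc.1 := by
          simp only [List.map_cons, List.nodup_cons] at hnd
          intro h; exact hnd.1 (h ▸ List.mem_map_of_mem ha)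
        simp [this, hfresh a (List.mem_cons_of_mem _ ha)]
      · simp only [List.map_cons, List.nodup_cons] at hnd
        exact hnd.2

-- ===== B-side machinery: the result dict stays a table over the squares =====

-- the result dict as a table over the squares
def tab (sq : List (String × List Int)) (f : (String × List Int) → String) : PySem.Dict String String :=
  PySem.Dict.mk (sq.map (fun nc => (nc.1, f nc)))

theorem tab_congr (sq : List (String × List Int)) (f g : (String × List Int) → String)
    (h : ∀ nc ∈ sq, f nc = g nc) : tab sq f = tab sq g := by
  unfold tab
  exact congrArg PySem.Dict.mk (List.map_congr_left (fun nc hnc => by rw [h nc hnc]))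

-- nodup keys make the key injective on the squares
theorem key_inj (sq : List (String × List Int)) (hnd : (sq.map Prod.fst).Nodup)
    {a b : String × List Int} (ha : a ∈ sq) (hb : b ∈ sq) (h : a.1 = b.1) : a = b :=
  List.inj_on_of_nodup_map hnd ha hb h

-- inserting at an existing key updates the table in place
theorem tab_insert (sq : List (String × List Int)) (f : (String × List Int) → String)
    (k v : String) (hk : k ∈ sq.map Prod.fst) :
    (tab sq f).insert k v = tab sq (fun nc => if nc.1 = k then v else f nc) := by
  apply PySem.Dict.ext
  rw [PySem.Dict.items_insert_of_contains]
  · unfold tab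
    simp only [List.map_map]
    refine List.map_congr_left (fun nc _ => ?_)
    by_cases h : nc.1 = k <;> simp [h]
  · unfold tab
    rw [PySem.Dict.contains_eq_decide_mem_keys]
    simp only [PySem.Dict.keys_mk, List.map_map]
    simpa using hk

-- the initial `{notation: 'nan' for notation in square_coords}` is the all-'nan' table
theorem init_tab (sq : List (String × List Int)) (hnd : (sq.map Prod.fst).Nodup) :
    sq.foldl (fun (r : PySem.Dict String String) nc => r.insert nc.1 "nan") PySem.Dict.empty
      = tab sq (fun _ => "nan") := by
  apply PySem.Dict.ext
  rw [PySem.Dict.items_foldl_insert_fresh sq Prod.fst (fun _ => "nan") PySem.Dict.empty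
        (fun a _ => PySem.Dict.contains_empty (Prod.fst a)) hnd]
  simp [tab, show (PySem.Dict.empty : PySem.Dict String String).items = [] from rfl]

-- the bucket of key k holds exactly the squares with x-bucket k, in order
theorem buckets_getD (sq : List (String × List Int)) (k : Int) :
    (pB_buckets sq).getD k [] = sq.filter (fun nc => pB_bx nc.2 == k) := by
  unfold pB_buckets
  rw [show sq.foldl (fun g nc => g.modify (pB_bx nc.2) [] (· ++ [nc])) PySem.Dict.empty
        = (sq.map (fun nc => (pB_bx nc.2, nc))).foldl (fun g p => g.modify p.1 [] (· ++ [p.2])) PySem.Dict.empty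
      from by rw [List.foldl_map]]
  rw [PySem.Dict.getD_foldl_modify_append]
  simp [List.filter_map, Function.comp_def]

-- a near square's bucket is one of the three neighbouring buckets of the coordinate
theorem near_bucket (n c : List Int) (h : pB_near n c = true) :
    pB_bx n = pB_bx c - 1 ∨ pB_bx n = pB_bx c ∨ pB_bx n = pB_bx c + 1 := by
  unfold pB_near at h
  unfold pB_bx
  rw [PySem.Int.floordiv_eq_ediv_of_pos (by norm_num), PySem.Int.floordiv_eq_ediv_of_pos (by norm_num)]
  simp only [Bool.and_eq_true, decide_eq_true_eq] at h
  omega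

-- stamping a list of candidate squares updates the table at its near members
theorem stamp_fold (sq ts : List (String × List Int)) (hsub : ∀ nc ∈ ts, nc ∈ sq)
    (hnd : (sq.map Prod.fst).Nodup) (letter : String) (c : List Int)
    (f : (String × List Int) → String) :
    ts.foldl (fun r nc => if pB_near nc.2 c then r.insert nc.1 letter else r) (tab sq f)
      = tab sq (fun nc => if nc ∈ ts ∧ pB_near nc.2 c then letter else f nc) := by
  induction ts generalizing f with
  | nil => exact tab_congr _ _ _ (fun nc _ => by simp)
  | cons t ts ih =>
      simp only [List.foldl_cons]
      by_cases hn : pB_near t.2 c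
      · rw [if_pos hn, tab_insert sq f t.1 letter
              (List.mem_map_of_mem (hsub t List.mem_cons_self)),
            ih (fun nc hnc => hsub nc (List.mem_cons_of_mem _ hnc))]
        refine tab_congr _ _ _ (fun nc hnc => ?_)
        by_cases hts : nc ∈ ts ∧ pB_near nc.2 c
        · simp [hts, List.mem_cons_of_mem t hts.1]
        · by_cases hk : nc.1 = t.1
          · have : nc = t := key_inj sq hnd hnc (hsub t List.mem_cons_self) hk
            subst this
            simp [hn]
          · have : ¬ (nc ∈ t :: ts ∧ pB_near nc.2 c) := by
              rintro ⟨hmem, hnear⟩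
              rcases List.mem_cons.mp hmem with h | h
              · exact hk (congrArg Prod.fst h)
              · exact hts ⟨h, hnear⟩
            rw [if_neg hts, if_neg hk, if_neg this]
      · rw [if_neg hn, ih (fun nc hnc => hsub nc (List.mem_cons_of_mem _ hnc))]
        refine tab_congr _ _ _ (fun nc hnc => ?_)
        by_cases hts : nc ∈ ts ∧ pB_near nc.2 c
        · simp [hts, List.mem_cons_of_mem t hts.1]
        · have : ¬ (nc ∈ t :: ts ∧ pB_near nc.2 c) := by
            rintro ⟨hmem, hnear⟩
            rcases List.mem_cons.mp hmem with h | h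
            · exact hn (h ▸ hnear)
            · exact hts ⟨h, hnear⟩
          rw [if_neg hts, if_neg this]

-- stamping one piece coordinate through the buckets updates exactly the near squares
theorem stampCoord_tab (sq : List (String × List Int)) (hnd : (sq.map Prod.fst).Nodup)
    (letter : String) (c : List Int) (f : (String × List Int) → String) :
    pB_stampCoord letter c (pB_buckets sq) (tab sq f)
      = tab sq (fun nc => if pB_near nc.2 c then letter else f nc) := by
  unfold pB_stampCoord
  simp only [List.foldl_cons, List.foldl_nil, buckets_getD]
  rw [stamp_fold sq _ (fun nc hnc => (List.mem_filter.mp hnc).1) hnd letter c,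
      stamp_fold sq _ (fun nc hnc => (List.mem_filter.mp hnc).1) hnd letter c,
      stamp_fold sq _ (fun nc hnc => (List.mem_filter.mp hnc).1) hnd letter c]
  refine tab_congr _ _ _ (fun nc hnc => ?_)
  by_cases hnear : pB_near nc.2 c
  · rcases near_bucket nc.2 c hnear with hb | hb | hb <;>
      simp [hnear, List.mem_filter, hnc, hb]
  · simp [hnear]

-- stamping all coordinates of one piece updates the squares near any of them
theorem stampPiece_tab (sq : List (String × List Int)) (hnd : (sq.map Prod.fst).Nodup)
    (letter : String) (cs : List (List Int)) (f : (String × List Int) → String) :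
    cs.foldl (fun r c => pB_stampCoord letter c (pB_buckets sq) r) (tab sq f)
      = tab sq (fun nc => if cs.any (fun c => pB_near nc.2 c) then letter else f nc) := by
  induction cs generalizing f with
  | nil => exact tab_congr _ _ _ (fun nc _ => by simp)
  | cons c cs ih =>
      simp only [List.foldl_cons]
      rw [stampCoord_tab sq hnd letter c f, ih]
      refine tab_congr _ _ _ (fun nc _ => ?_)
      by_cases h1 : cs.any (fun c' => pB_near nc.2 c') <;>
        by_cases h2 : pB_near nc.2 c <;> simp [h1, h2]

-- the whole piece loop, as a per-square fold over the pieces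
theorem pieces_tab (sq : List (String × List Int)) (hnd : (sq.map Prod.fst).Nodup)
    (pc : List (String × List (List Int))) (f : (String × List Int) → String) :
    pc.foldl (fun r pp =>
        match pB_letter.get? pp.1 with
        | none => r
        | some letter => pp.2.foldl (fun r c => pB_stampCoord letter c (pB_buckets sq) r) r) (tab sq f)
      = tab sq (fun nc => pc.foldl (fun v pp =>
          match pB_letter.get? pp.1 with
          | none => v
          | some L => if pp.2.any (fun c => pB_near nc.2 c) then L else v) (f nc)) := by
  induction pc generalizing f with
  | nil => simp
  | cons pp pc ih =>
      simp only [List.foldl_cons]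
      cases hL : pB_letter.get? pp.1 with
      | none =>
          simp only []
          rw [ih]
      | some L =>
          simp only []
          rw [stampPiece_tab sq hnd L pp.2 f, ih]

-- B's per-square fold over the pieces computes the last near known piece's letter
theorem val_eq_lastHit (n : List Int) (pc : List (String × List (List Int))) :
    pc.foldl (fun v pp =>
        match pB_letter.get? pp.1 with
        | none => v
        | some L => if pp.2.any (fun c => pB_near n c) then L else v) "nan"
      = ((hitLetters n pc).getLast?).getD "nan" := by
  induction pc using List.reverseRecOn with
  | nil => rfl
  | append_singleton l pp ih =>
      simp only [List.foldl_append, List.foldl_cons, List.foldl_nil]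
      unfold hitLetters
      rw [List.filterMap_append]
      cases hL : pB_letter.get? pp.1 with
      | none =>
          rw [show List.filterMap (fun pp => if pA_firstHit n pp.2 = true then pB_letter.get? pp.1 else none) [pp] = [] from by
                cases h : pA_firstHit n pp.2 <;> simp [h, hL],
              List.append_nil]
          exact ih
      | some L =>
          by_cases hhit : pp.2.any (fun c => pB_near n c)
          · have hf : pA_firstHit n pp.2 = true := by
              rw [firstHit_eq_any]; simpa using hhit
            rw [show List.filterMap (fun pp => if pA_firstHit n pp.2 = true then pB_letter.get? pp.1 else none) [pp] = [L] from by simp [hf, hL],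
                List.getLast?_concat]
            simp [hhit]
          · have hf : pA_firstHit n pp.2 = false := by
              rw [firstHit_eq_any]; simpa using hhit
            rw [show List.filterMap (fun pp => if pA_firstHit n pp.2 = true then pB_letter.get? pp.1 else none) [pp] = [] from by simp [hf],
                List.append_nil]
            simp only [hhit]
            exact ih

-- ===== VERDICT (by name: the statement is the Claim_ definition above) =====
theorem place_piece_notation_spec : Claim_equal_place_piece_notation := by
  intro sq pc _hdom hpre
  obtain ⟨hndsq, _hndpc, _h1, _h2, _h3⟩ := hpre
  unfold Spec_place_piece_notation place_piece_notation place_piece_notation_alt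
  rw [outerA pc sq PySem.Dict.empty (by intro a _; exact PySem.Dict.contains_empty a.1) hndsq]
  rw [init_tab sq hndsq, pieces_tab sq hndsq pc (fun _ => "nan")]
  rw [show (PySem.Dict.empty : PySem.Dict String String).items = [] from rfl, List.nil_append]
  have htab : ∀ (F : (String × List Int) → String), (tab sq F).items = sq.map (fun nc => (nc.1, F nc)) := fun F => rfl
  rw [htab]
  exact List.map_congr_left (fun nc _ => by rw [val_eq_lastHit nc.2 pc])
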